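-- pv_equiv track=rewrite | github.com/todor/tax-reporting-public | tests/integrations/ibkr/test_activity_statement_analyzer.py | _interest_header_and_data
-- ===== SOURCE A (Python) =====
-- def _interest_header_and_data(rows: list[list[str]]) -> tuple[list[str], list[list[str]]]:
--     header: list[str] | None = None
--     data_rows: list[list[str]] = []
--     for row in rows:
--         if len(row) < 2 or row[0] != "Interest":
--             continue
--         if row[1] == "Header":
--             header = row
--         elif row[1] == "Data":
--             data_rows.append(row)
--     assert header is not None
--     return header, data_rows
-- ===== SOURCE B (Python) =====
-- def _interest_header_and_data(rows: list[list[str]]) -> tuple[list[str], list[list[str]]]: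
--     # Backward index search with early exit for the last Header row, plus one filter for Data rows.
--     i = len(rows) - 1
--     while i >= 0:
--         r = rows[i]
--         if len(r) >= 2 and r[0] == "Interest" and r[1] == "Header":
--             break
--         i -= 1
--     assert i >= 0
--     data_rows = [r for r in rows if len(r) >= 2 and r[0] == "Interest" and r[1] == "Data"]
--     return rows[i], data_rows
-- ===== Notes on version B (the rewrite author's own statement) =====
-- stated objective: alternative
-- what changed: Replaces A's single forward pass that overwrites a header accumulator by an early-terminating backward index search (while/break) for the last Header row plus one independent filter for the Data rows.
import Mathlib
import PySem

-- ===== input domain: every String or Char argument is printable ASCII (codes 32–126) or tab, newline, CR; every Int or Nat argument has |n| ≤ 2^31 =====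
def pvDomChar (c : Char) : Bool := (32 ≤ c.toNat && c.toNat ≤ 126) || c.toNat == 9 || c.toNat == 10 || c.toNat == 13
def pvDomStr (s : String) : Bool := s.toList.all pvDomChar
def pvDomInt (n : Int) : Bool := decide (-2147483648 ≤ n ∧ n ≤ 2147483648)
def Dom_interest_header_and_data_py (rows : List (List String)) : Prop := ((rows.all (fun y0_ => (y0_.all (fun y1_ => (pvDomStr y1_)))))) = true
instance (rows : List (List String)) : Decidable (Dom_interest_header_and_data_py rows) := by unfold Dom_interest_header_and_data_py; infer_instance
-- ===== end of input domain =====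

-- B replaces A's single forward pass with an overwritten header accumulator by an
-- early-terminating backward index search (while/break) for the last Header row
-- plus one independent filter for the Data rows.
-- ===== PORT A =====
def interestStepA (st : Option (List String) × List (List String)) (row : List String) :
    Option (List String) × List (List String) :=
  if decide (row.length < 2) || !(PySem.List.pyGet? row 0 == some "Interest") then st
  else if PySem.List.pyGet? row 1 == some "Header" then (some row, st.2)
  else if PySem.List.pyGet? row 1 == some "Data" then (st.1, st.2 ++ [row])
  else st

def interest_header_and_data_py (rows : List (List String)) : List String × List (List String) :=
  let st := rows.foldl interestStepA (none, [])
  -- 'assert header is not None': Pre_ excludes st.1 = none (Python raises AssertionError there)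
  (st.1.getD [], st.2)

-- ===== PORT B =====
def isHdrB (r : List String) : Bool :=
  decide (2 ≤ r.length) && (PySem.List.pyGet? r 0 == some "Interest") && (PySem.List.pyGet? r 1 == some "Header")

def isDataB (r : List String) : Bool :=
  decide (2 ≤ r.length) && (PySem.List.pyGet? r 0 == some "Interest") && (PySem.List.pyGet? r 1 == some "Data")

-- the 'while i >= 0: … break … i -= 1' search, counting the index down
def findHdrIdxB (rows : List (List String)) : Nat → Option Nat
  | 0 => if isHdrB (rows.getD 0 []) then some 0 else none
  | i+1 => if isHdrB (rows.getD (i+1) []) then some (i+1) else findHdrIdxB rows i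

def interest_header_and_data_py_alt (rows : List (List String)) : List String × List (List String) :=
  let hi := findHdrIdxB rows (rows.length - 1)
  -- 'assert i >= 0': Pre_ excludes hi = none (Python raises AssertionError there)
  ((hi.map (fun i => rows.getD i [])).getD [], rows.filter isDataB)

-- ===== PRECONDITION & SPEC =====
-- Pre_ excludes exactly the inputs with no row ["Interest", "Header", ...]: both A and B raise AssertionError there.
def Pre_interest_header_and_data_py (rows : List (List String)) : Prop :=
  ∃ r ∈ rows, PySem.List.pyGet? r 0 = some "Interest" ∧ PySem.List.pyGet? r 1 = some "Header"
instance (rows : List (List String)) : Decidable (Pre_interest_header_and_data_py rows) := by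
  unfold Pre_interest_header_and_data_py; infer_instance
def pvWitness_interest_header_and_data_py : List (List String) := [["Interest", "Header"]]

def Spec_interest_header_and_data_py (rows : List (List String)) (out : List String × List (List String)) : Prop := out = interest_header_and_data_py_alt rows
instance (rows : List (List String)) (out : List String × List (List String)) : Decidable (Spec_interest_header_and_data_py rows out) := by unfold Spec_interest_header_and_data_py; infer_instance

-- ===== CLAIM (what is proved, stated in full; the proofs are below) =====
def Claim_equal_interest_header_and_data_py : Prop := ∀ (rows : List (List String)), Dom_interest_header_and_data_py rows → Pre_interest_header_and_data_py rows → Spec_interest_header_and_data_py rows (interest_header_and_data_py rows)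

-- ===== LEMMAS AND PROOFS =====
def interestRowB (r : List String) : Bool :=
  decide (2 ≤ r.length) && (PySem.List.pyGet? r 0 == some "Interest")

lemma interest_loop_eq (rows : List (List String)) (st : Option (List String) × List (List String)) :
    rows.foldl interestStepA st =
      (((rows.filter interestRowB).reverse.find? (fun r => PySem.List.pyGet? r 1 == some "Header")).or st.1,
       st.2 ++ (rows.filter interestRowB).filter (fun r => PySem.List.pyGet? r 1 == some "Data")) := by
  induction rows generalizing st with
  | nil => simp
  | cons row rest ih =>
    by_cases hrow : interestRowB row = true
    · have hguard : (decide (row.length < 2) || !(PySem.List.pyGet? row 0 == some "Interest")) = false := by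
        simp only [interestRowB, Bool.and_eq_true, decide_eq_true_eq, beq_iff_eq] at hrow
        simp [hrow.2]; omega
      rw [List.foldl_cons, List.filter_cons_of_pos hrow, List.reverse_cons]
      by_cases hH : (PySem.List.pyGet? row 1 == some "Header") = true
      · have hstep : interestStepA st row = (some row, st.2) := by
          unfold interestStepA; rw [hguard]; simp [hH]
        rw [hstep, ih, List.find?_append]
        have hf1 : List.find? (fun r => PySem.List.pyGet? r 1 == some "Header") [row] = some row := by
          simp [List.find?, hH]
        rw [hf1]
        cases List.find? (fun r => PySem.List.pyGet? r 1 == some "Header")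
          (List.filter interestRowB rest).reverse <;>
          simp [eq_of_beq hH]
      · rw [List.find?_append]
        have hf1 : List.find? (fun r => PySem.List.pyGet? r 1 == some "Header") [row] = none := by
          simp [List.find?, hH]
        rw [hf1, Option.or_none]
        by_cases hD : (PySem.List.pyGet? row 1 == some "Data") = true
        · have hstep : interestStepA st row = (st.1, st.2 ++ [row]) := by
            unfold interestStepA; rw [hguard]; simp [hH, hD]
          rw [hstep, ih]
          simp [eq_of_beq hD]
        · have hstep : interestStepA st row = st := by
            unfold interestStepA; rw [hguard]; simp [hH, hD]
          rw [hstep, ih]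
          simp [hD]
    · have hguard : (decide (row.length < 2) || !(PySem.List.pyGet? row 0 == some "Interest")) = true := by
        simp only [interestRowB, Bool.and_eq_true, decide_eq_true_eq, beq_iff_eq, not_and] at hrow
        by_cases hl : row.length < 2
        · simp [hl]
        · simp only [Bool.or_eq_true, decide_eq_true_eq, Bool.not_eq_true', beq_eq_false_iff_ne, ne_eq]
          exact Or.inr (hrow (by omega))
      have hstep : interestStepA st row = st := by
        unfold interestStepA; rw [hguard]; simp
      rw [List.foldl_cons, hstep, ih, List.filter_cons_of_neg (by simpa using hrow)]

lemma find?_filter_and {α : Type} (l : List α) (q p : α → Bool) :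
    (l.filter q).find? p = l.find? (fun x => q x && p x) := by
  induction l with
  | nil => rfl
  | cons a t ih =>
    by_cases hq : q a = true
    · rw [List.filter_cons_of_pos hq]
      by_cases hp : p a = true
      · simp [List.find?, hq, hp]
      · simp [List.find?, hq, hp, ih]
    · rw [List.filter_cons_of_neg (by simpa using hq)]
      simp [List.find?, hq, ih]

-- the countdown search finds the last Header row among the first i+1 rows
lemma findHdrIdxB_eq (rows : List (List String)) (i : Nat) (hi : i < rows.length) :
    (findHdrIdxB rows i).map (fun j => rows.getD j []) =
      ((rows.take (i+1)).reverse).find? isHdrB := by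
  induction i with
  | zero =>
    obtain ⟨r, t, rfl⟩ : ∃ r t, rows = r :: t := by
      cases rows with
      | nil => simp at hi
      | cons r t => exact ⟨r, t, rfl⟩
    by_cases h : isHdrB r = true <;> simp [findHdrIdxB, List.find?, h]
  | succ i ih =>
    have hi' : i < rows.length := by omega
    have hg : rows.getD (i+1) [] = rows[i+1] := by
      rw [List.getD_eq_getElem?_getD, List.getElem?_eq_getElem hi]; rfl
    have htake : rows.take (i+2) = rows.take (i+1) ++ [rows.getD (i+1) []] := by
      rw [List.take_add_one, List.getElem?_eq_getElem hi, hg]; rfl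
    rw [htake, List.reverse_append, List.reverse_singleton, List.singleton_append]
    simp only [findHdrIdxB]
    by_cases h : isHdrB (rows.getD (i+1) []) = true
    · rw [if_pos h, List.find?_cons_of_pos h]; rfl
    · rw [if_neg h, List.find?_cons_of_neg (by simpa using h), ih hi']

lemma hdr_eq (rows : List (List String)) :
    (findHdrIdxB rows (rows.length - 1)).map (fun j => rows.getD j []) =
      rows.reverse.find? isHdrB := by
  cases rows with
  | nil => rfl
  | cons r t =>
    have h := findHdrIdxB_eq (r :: t) ((r :: t).length - 1) (by simp)
    simpa using h

-- ===== VERDICT (by name: the statement is the Claim_ definition above) =====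
theorem interest_header_and_data_py_spec : Claim_equal_interest_header_and_data_py := by
  intro rows _ _
  show _ = _
  rw [interest_header_and_data_py, interest_header_and_data_py_alt]
  rw [interest_loop_eq]
  have hdata : (rows.filter interestRowB).filter (fun r => PySem.List.pyGet? r 1 == some "Data")
      = rows.filter isDataB := by
    rw [List.filter_filter]
    apply List.filter_congr
    intro r _
    simp only [interestRowB, isDataB]
    cases PySem.List.pyGet? r 1 == some "Data" <;>
      cases decide (2 ≤ r.length) <;>
        cases PySem.List.pyGet? r 0 == some "Interest" <;> rfl
  have hhdr : (rows.filter interestRowB).reverse.find? (fun r => PySem.List.pyGet? r 1 == some "Header")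
      = rows.reverse.find? isHdrB := by
    rw [← List.filter_reverse, find?_filter_and]
    rfl
  simp only [Option.or_none, hdata, hhdr, ← hdr_eq]
  rfl
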